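-- pv_equiv track=rewrite | github.com/cbcoutinho/nextcloud-mcp-server | scripts/add_scope_decorators_simple.py | classify_function
-- ===== SOURCE A (Python) =====
-- READ_KEYWORDS = [
--     "get",
--     "list",
--     "search",
--     "read",
--     "find",
--     "fetch",
--     "retrieve",
--     "upcoming",
-- ]
--
-- WRITE_KEYWORDS = [
--     "create",
--     "update",
--     "delete",
--     "append",
--     "modify",
--     "set",
--     "add",
--     "remove",
--     "edit",
--     "move",
--     "copy",
--     "upload",
--     "download",
--     "share",
--     "unshare",
--     "bulk",
--     "manage",
--     "import",
--     "reindex",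
--     "archive",
--     "unarchive",
--     "reorder",
--     "assign",
--     "unassign",
--     "insert",
--     "write",
-- ]
--
-- def classify_function(func_name: str) -> str | None:
--     """Classify a function name as read or write operation."""
--     func_lower = func_name.lower()
--
--     # Check write keywords first (more specific)
--     for keyword in WRITE_KEYWORDS:
--         if f"_{keyword}_" in func_lower or func_lower.endswith(f"_{keyword}"):
--             return "nc:write"
--
--     # Check read keywords
--     for keyword in READ_KEYWORDS:
--         if f"_{keyword}_" in func_lower or func_lower.endswith(f"_{keyword}"):
--             return "nc:read"
--
--     return None
-- ===== SOURCE B (Python) =====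
-- READ_KEYWORDS = [
--     "get",
--     "list",
--     "search",
--     "read",
--     "find",
--     "fetch",
--     "retrieve",
--     "upcoming",
-- ]
--
-- WRITE_KEYWORDS = [
--     "create",
--     "update",
--     "delete",
--     "append",
--     "modify",
--     "set",
--     "add",
--     "remove",
--     "edit",
--     "move",
--     "copy",
--     "upload",
--     "download",
--     "share",
--     "unshare",
--     "bulk",
--     "manage",
--     "import",
--     "reindex",
--     "archive",
--     "unarchive",
--     "reorder",
--     "assign",
--     "unassign",
--     "insert",
--     "write",
-- ]
--
-- WRITE_SET = frozenset(WRITE_KEYWORDS)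
-- READ_SET = frozenset(READ_KEYWORDS)
--
--
-- def classify_function(func_name: str) -> str | None:
--     """Classify a function name as read or write operation."""
--     # every keyword match in A requires a leading '_', so the first token never counts
--     candidates = func_name.lower().split("_")[1:]
--     if any(tok in WRITE_SET for tok in candidates):
--         return "nc:write"
--     if any(tok in READ_SET for tok in candidates):
--         return "nc:read"
--     return None
-- ===== Notes on version B (the rewrite author's own statement) =====
-- stated objective: idiomatic
-- what changed: A scans every keyword and searches the whole name for '_kw_' / trailing '_kw'; B tokenizes the name once on '_' and looks the interior/trailing tokens up in frozensets of the keywords.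
import Mathlib
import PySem

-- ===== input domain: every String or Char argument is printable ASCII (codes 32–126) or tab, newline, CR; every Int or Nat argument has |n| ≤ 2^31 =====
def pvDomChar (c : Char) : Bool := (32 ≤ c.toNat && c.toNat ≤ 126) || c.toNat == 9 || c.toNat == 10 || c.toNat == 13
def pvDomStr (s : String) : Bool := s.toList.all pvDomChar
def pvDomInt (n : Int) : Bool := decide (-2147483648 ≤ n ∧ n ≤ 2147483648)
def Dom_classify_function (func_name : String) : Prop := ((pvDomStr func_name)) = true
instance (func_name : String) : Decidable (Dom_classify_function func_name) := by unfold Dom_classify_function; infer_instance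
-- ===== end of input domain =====

-- B replaces A's two substring scans over the keyword lists by one tokenization of the
-- name plus set lookups of its interior/trailing tokens (idiomatic; same observable value).

-- ===== PORT A =====
def READ_KEYWORDS : List String :=
  ["get", "list", "search", "read", "find", "fetch", "retrieve", "upcoming"]

def WRITE_KEYWORDS : List String :=
  ["create", "update", "delete", "append", "modify", "set", "add", "remove",
   "edit", "move", "copy", "upload", "download", "share", "unshare", "bulk",
   "manage", "import", "reindex", "archive", "unarchive", "reorder", "assign",
   "unassign", "insert", "write"]

def classify_function (func_name : String) : Option String :=
  let func_lower := PySem.Str.lower func_name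
  -- Check write keywords first (more specific)
  if WRITE_KEYWORDS.any (fun keyword =>
      PySem.Str.isIn ("_" ++ keyword ++ "_") func_lower ||
      PySem.Str.endswith func_lower ("_" ++ keyword)) then
    some "nc:write"
  -- Check read keywords
  else if READ_KEYWORDS.any (fun keyword =>
      PySem.Str.isIn ("_" ++ keyword ++ "_") func_lower ||
      PySem.Str.endswith func_lower ("_" ++ keyword)) then
    some "nc:read"
  else
    none

-- ===== PORT B =====
def WRITE_SET : PySem.Set (List Char) := PySem.Set.ofList (WRITE_KEYWORDS.map String.toList)
def READ_SET : PySem.Set (List Char) := PySem.Set.ofList (READ_KEYWORDS.map String.toList)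

def classify_function_alt (func_name : String) : Option String :=
  -- candidates = func_name.lower().split("_")[1:]   (split("_") ported as List.splitOn on the char list)
  let candidates := ((PySem.Str.lower func_name).toList.splitOn '_').drop 1
  if candidates.any (fun tok => WRITE_SET.contains tok) then some "nc:write"
  else if candidates.any (fun tok => READ_SET.contains tok) then some "nc:read"
  else none

-- ===== PRECONDITION & SPEC =====
def Spec_classify_function (func_name : String) (out : Option String) : Prop := out = classify_function_alt func_name
instance (func_name : String) (out : Option String) : Decidable (Spec_classify_function func_name out) := by unfold Spec_classify_function; infer_instance

-- ===== CLAIM (what is proved, stated in full; the proofs are below) =====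
def Claim_equal_classify_function : Prop := ∀ (func_name : String), Dom_classify_function func_name → Spec_classify_function func_name (classify_function func_name)

-- ===== LEMMAS AND PROOFS =====

-- Core tokenization fact: for a keyword without '_',
--   "kw is the first token of s"  ↔  kw++"_" is a prefix of s or s = kw, and
--   "kw is a later token of s"    ↔  "_kw_" occurs in s or s ends with "_kw".
lemma tok_core (s : List Char) : ∀ kw : List Char, '_' ∉ kw →
    ((((kw ++ ['_']) <+: s ∨ s = kw) ↔ (s.splitOnP (· == '_')).headI = kw)
     ∧ ((('_' :: (kw ++ ['_'])) <:+: s ∨ ('_' :: kw) <:+ s) ↔ kw ∈ (s.splitOnP (· == '_')).drop 1)) := by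
  induction s with
  | nil =>
    intro kw hk
    constructor
    · rw [List.splitOnP_nil]
      constructor
      · rintro (h | h)
        · exact absurd (List.prefix_nil.mp h) (by simp)
        · exact h
      · exact fun h => Or.inr h
    · simp [List.splitOnP_nil]
  | cons c s ih =>
    intro kw hk
    have hne := List.splitOnP_ne_nil (fun x => x == '_') s
    obtain ⟨h0, t, hs⟩ := List.exists_cons_of_ne_nil hne
    by_cases hc : c = '_'
    · subst hc
      rw [List.splitOnP_cons]
      simp only [beq_self_eq_true, if_true]
      constructor
      · -- head part: first token of '_'::s is []
        constructor
        · rintro (hpre | heq)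
          · cases kw with
            | nil => simp
            | cons d kw' =>
              exfalso
              rcases hpre with ⟨r, hr⟩
              simp at hr
              apply hk
              simp [hr.1]
          · exfalso
            cases kw with
            | nil => simp at heq
            | cons d kw' =>
              injection heq with h1 _
              apply hk
              simp [← h1]
        · intro h
          simp at h
          subst h
          left
          exact ⟨s, rfl⟩
      · -- tail part
        have hin : ('_' :: (kw ++ ['_'])) <:+: ('_' :: s) ↔
            ((kw ++ ['_']) <+: s ∨ ('_' :: (kw ++ ['_'])) <:+: s) := by
          rw [List.infix_cons_iff]
          constructor
          · rintro (h | h)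
            · left; exact (List.cons_prefix_cons.mp h).2
            · right; exact h
          · rintro (h | h)
            · left; exact List.cons_prefix_cons.mpr ⟨rfl, h⟩
            · right; exact h
        have hsuf : ('_' :: kw) <:+ ('_' :: s) ↔ (s = kw ∨ ('_' :: kw) <:+ s) := by
          rw [List.suffix_cons_iff]
          constructor
          · rintro (h | h)
            · left; injection h with _ h2; exact h2.symm
            · right; exact h
          · rintro (h | h)
            · left; rw [h]
            · right; exact h
        rw [hin, hsuf]
        have ihh := (ih kw hk).1
        have iht := (ih kw hk).2
        simp only [List.drop_one, List.tail_cons]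
        rw [hs] at ihh iht ⊢
        simp only [List.headI_cons] at ihh
        simp only [List.drop_one, List.tail_cons] at iht
        simp only [List.mem_cons]
        constructor
        · rintro ((h | h) | (h | h))
          · left; exact (ihh.mp (Or.inl h)).symm
          · right; exact iht.mp (Or.inl h)
          · left; exact (ihh.mp (Or.inr h)).symm
          · right; exact iht.mp (Or.inr h)
        · rintro (h | h)
          · rcases ihh.mpr h.symm with h' | h'
            · exact Or.inl (Or.inl h')
            · exact Or.inr (Or.inl h')
          · rcases iht.mpr h with h' | h'
            · exact Or.inl (Or.inr h')
            · exact Or.inr (Or.inr h')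
    · rw [List.splitOnP_cons]
      have hcb : ((c == '_') = false) := by simp [hc]
      rw [hcb]
      simp only [if_neg Bool.false_ne_true]
      rw [hs]
      simp only [List.modifyHead_cons]
      constructor
      · -- head part
        cases kw with
        | nil =>
          constructor
          · rintro (hpre | heq)
            · exfalso
              rcases List.cons_prefix_cons.mp hpre with ⟨h1, _⟩
              exact hc h1.symm
            · exact absurd heq (by simp)
          · intro h; exact absurd h (by simp)
        | cons d kw' =>
          have hk' : '_' ∉ kw' := fun h => hk (List.mem_cons_of_mem _ h)
          have hd : d ≠ '_' := fun h => hk (by simp [h])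
          by_cases hdc : d = c
          · subst hdc
            have ihh := (ih kw' hk').1
            rw [hs] at ihh
            simp only [List.headI_cons] at ihh
            constructor
            · rintro (hpre | heq)
              · have := (List.cons_prefix_cons.mp hpre).2
                have : h0 = kw' := ihh.mp (Or.inl this)
                simp [this]
              · injection heq with _ h2
                have : h0 = kw' := ihh.mp (Or.inr h2)
                simp [this]
            · intro h
              injection h with _ h2
              rcases ihh.mpr h2 with h' | h'
              · exact Or.inl (List.cons_prefix_cons.mpr ⟨rfl, h'⟩)
              · right; rw [h']
          · constructor
            · rintro (hpre | heq)
              · exact absurd (List.cons_prefix_cons.mp hpre).1 hdc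
              · refine absurd ?_ hdc
                injection heq with h1 _
                exact h1.symm
            · intro h
              injection h with h1 _
              exact absurd h1.symm hdc
      · -- tail part
        have iht := (ih kw hk).2
        rw [hs] at iht
        simp only [List.drop_one, List.tail_cons] at iht ⊢
        rw [← iht]
        have hin : ('_' :: (kw ++ ['_'])) <:+: (c :: s) ↔ ('_' :: (kw ++ ['_'])) <:+: s := by
          rw [List.infix_cons_iff]
          constructor
          · rintro (h | h)
            · exact absurd (List.cons_prefix_cons.mp h).1.symm hc
            · exact h
          · exact Or.inr
        have hsuf : ('_' :: kw) <:+ (c :: s) ↔ ('_' :: kw) <:+ s := by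
          rw [List.suffix_cons_iff]
          constructor
          · rintro (h | h)
            · exact absurd (by injection h with h1 _; exact h1.symm) hc
            · exact h
          · exact Or.inr
        rw [hin, hsuf]

-- A's per-keyword test equals "kw is an interior/trailing token of fn".
lemma check_iff (fn kw : String) (hk : '_' ∉ kw.toList) :
    (PySem.Str.isIn ("_" ++ kw ++ "_") fn || PySem.Str.endswith fn ("_" ++ kw)) = true
      ↔ kw.toList ∈ ((fn.toList.splitOn '_').drop 1) := by
  have h := (tok_core fn.toList kw.toList hk).2
  rw [Bool.or_eq_true, PySem.Str.isIn_iff_infix, PySem.Str.endswith_eq,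
      PySem.Chars.endswith_iff]
  have h1 : ("_" ++ kw ++ "_").toList = '_' :: (kw.toList ++ ['_']) := by
    simp [String.toList_append]
  have h2 : ("_" ++ kw).toList = '_' :: kw.toList := by
    simp [String.toList_append]
  rw [h1, h2, List.splitOn]
  exact h

-- the two guard booleans agree (for each keyword list / set pair)
lemma any_eq (L : List String) (fn : String) (hL : ∀ kw ∈ L, '_' ∉ kw.toList) :
    (L.any fun keyword =>
        PySem.Str.isIn ("_" ++ keyword ++ "_") fn ||
        PySem.Str.endswith fn ("_" ++ keyword))
      = (((fn.toList.splitOn '_').drop 1).any fun tok =>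
          (PySem.Set.ofList (L.map String.toList)).contains tok) := by
  rw [Bool.eq_iff_iff]
  simp only [List.any_eq_true, PySem.Set.contains_iff, PySem.Set.mem_ofList, List.mem_map]
  constructor
  · rintro ⟨kw, hkw, hc⟩
    exact ⟨kw.toList, (check_iff fn kw (hL kw hkw)).mp hc, kw, hkw, rfl⟩
  · rintro ⟨tok, htok, kw, hkw, rfl⟩
    exact ⟨kw, hkw, (check_iff fn kw (hL kw hkw)).mpr htok⟩

-- ===== VERDICT (by name: the statement is the Claim_ definition above) =====
theorem classify_function_spec : Claim_equal_classify_function := by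
  intro fn _
  unfold Spec_classify_function classify_function classify_function_alt WRITE_SET READ_SET
  have hW : ∀ kw ∈ WRITE_KEYWORDS, '_' ∉ kw.toList := by decide
  have hR : ∀ kw ∈ READ_KEYWORDS, '_' ∉ kw.toList := by decide
  simp only []
  rw [any_eq WRITE_KEYWORDS (PySem.Str.lower fn) hW,
      any_eq READ_KEYWORDS (PySem.Str.lower fn) hR]
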